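-- pv_equiv track=rewrite | github.com/MinasukiHikimuna/Culture | libraries/libraries/client_stashapp.py | _get_stash_ids
-- ===== SOURCE A (Python) =====
-- def _get_stash_ids(stash_ids):
--     """Extract StashDB and TPDB IDs from stash_ids list."""
--     result = {
--         "stash_studios_stashdb_id": None,
--         "stash_studios_tpdb_id": None,
--         "stash_studios_ce_id": None,
--     }
--     if stash_ids:
--         for stash_id in stash_ids:
--             if stash_id["endpoint"] == "https://stashdb.org/graphql":
--                 result["stash_studios_stashdb_id"] = stash_id["stash_id"]
--             elif stash_id["endpoint"] == "https://theporndb.net/graphql":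
--                 result["stash_studios_tpdb_id"] = stash_id["stash_id"]
--             elif stash_id["endpoint"] == "https://culture.extractor/graphql":
--                 result["stash_studios_ce_id"] = stash_id["stash_id"]
--     return result
-- ===== SOURCE B (Python) =====
-- _ENDPOINTS = [
--     ("stash_studios_stashdb_id", "https://stashdb.org/graphql"),
--     ("stash_studios_tpdb_id", "https://theporndb.net/graphql"),
--     ("stash_studios_ce_id", "https://culture.extractor/graphql"),
-- ]
--
--
-- def _get_stash_ids(stash_ids):
--     """Extract StashDB and TPDB IDs from stash_ids list."""
--     entries = list(reversed(stash_ids)) if stash_ids else []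
--     return {
--         key: next((s["stash_id"] for s in entries if s["endpoint"] == ep), None)
--         for key, ep in _ENDPOINTS
--     }
-- ===== Notes on version B (the rewrite author's own statement) =====
-- stated objective: alternative
-- what changed: A makes one pass over stash_ids mutating a fixed 3-key result dict via an if/elif chain (last occurrence wins); B inverts the loops: for each of the three target endpoints it searches the reversed list for the first matching entry (first-in-reversed = last-in-original), so there is no mutated accumulator at all.
import Mathlib
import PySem

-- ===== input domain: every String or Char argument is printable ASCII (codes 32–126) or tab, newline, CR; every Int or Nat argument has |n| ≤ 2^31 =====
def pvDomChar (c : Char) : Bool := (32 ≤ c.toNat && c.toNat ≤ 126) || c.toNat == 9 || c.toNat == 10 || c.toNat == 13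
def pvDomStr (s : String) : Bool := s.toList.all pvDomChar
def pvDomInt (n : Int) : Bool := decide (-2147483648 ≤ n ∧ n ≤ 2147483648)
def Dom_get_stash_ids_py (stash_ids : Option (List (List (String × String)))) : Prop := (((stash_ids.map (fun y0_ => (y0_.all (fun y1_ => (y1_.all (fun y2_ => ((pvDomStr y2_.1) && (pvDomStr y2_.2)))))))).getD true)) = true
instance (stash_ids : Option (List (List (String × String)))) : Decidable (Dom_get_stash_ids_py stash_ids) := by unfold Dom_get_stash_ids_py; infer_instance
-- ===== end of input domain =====

-- B inverts A's loops: instead of one pass mutating a fixed 3-key result dict, it searches the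
-- reversed list once per target endpoint for the first match (= A's last-occurrence-wins); same O(n) cost.

-- ===== PORT A =====
-- A's loop body: if/elif chain on stash_id["endpoint"], assigning stash_id["stash_id"] into the fixed result dict.
-- Key lookups stash_id["endpoint"] / stash_id["stash_id"] are ported with getD ""/get?; exact under Pre_ (keys present where accessed).
def pvStepA (r : PySem.Dict String (Option String)) (s : List (String × String)) : PySem.Dict String (Option String) :=
  let ep := (PySem.Dict.mk s).getD "endpoint" ""
  if ep == "https://stashdb.org/graphql" then
    r.insert "stash_studios_stashdb_id" ((PySem.Dict.mk s).get? "stash_id")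
  else if ep == "https://theporndb.net/graphql" then
    r.insert "stash_studios_tpdb_id" ((PySem.Dict.mk s).get? "stash_id")
  else if ep == "https://culture.extractor/graphql" then
    r.insert "stash_studios_ce_id" ((PySem.Dict.mk s).get? "stash_id")
  else r

def get_stash_ids_py (stash_ids : Option (List (List (String × String)))) : List (String × Option String) :=
  let result : PySem.Dict String (Option String) :=
    PySem.Dict.mk [("stash_studios_stashdb_id", none), ("stash_studios_tpdb_id", none), ("stash_studios_ce_id", none)]
  -- 'if stash_ids:' — falsy for None and for []
  let result :=
    match stash_ids with
    | none => result
    | some l => if l.isEmpty then result else l.foldl pvStepA result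
  result.items

-- ===== PORT B =====
-- fixed (result key, endpoint) table (_ENDPOINTS in Source B)
def pvEndpoints : List (String × String) :=
  [("stash_studios_stashdb_id", "https://stashdb.org/graphql"),
   ("stash_studios_tpdb_id", "https://theporndb.net/graphql"),
   ("stash_studios_ce_id", "https://culture.extractor/graphql")]

-- next((s["stash_id"] for s in entries if s["endpoint"] == ep), None): first match in entries, else None
def pvFirst (entries : List (List (String × String))) (ep : String) : Option String :=
  (entries.find? (fun s => (PySem.Dict.mk s).getD "endpoint" "" == ep)).bind
    (fun s => (PySem.Dict.mk s).get? "stash_id")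

def get_stash_ids_py_alt (stash_ids : Option (List (List (String × String)))) : List (String × Option String) :=
  let entries :=
    match stash_ids with
    | none => []
    | some l => if l.isEmpty then [] else l.reverse
  pvEndpoints.map (fun p => (p.1, pvFirst entries p.2))

-- ===== PRECONDITION & SPEC =====
-- Pre_ excludes exactly the inputs where the Python A raises KeyError: an entry missing "endpoint",
-- or an entry whose endpoint is one of the three target URLs but missing "stash_id".
def Pre_get_stash_ids_py (stash_ids : Option (List (List (String × String)))) : Prop :=
  ∀ s ∈ stash_ids.getD [],
    ((PySem.Dict.mk s).get? "endpoint").isSome = true ∧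
    ((PySem.Dict.mk s).getD "endpoint" "" ∈ ["https://stashdb.org/graphql", "https://theporndb.net/graphql", "https://culture.extractor/graphql"] →
      ((PySem.Dict.mk s).get? "stash_id").isSome = true)
instance (stash_ids : Option (List (List (String × String)))) : Decidable (Pre_get_stash_ids_py stash_ids) := by unfold Pre_get_stash_ids_py; infer_instance

def pvWitness_get_stash_ids_py : (Option (List (List (String × String)))) :=
  some [[("endpoint", "https://stashdb.org/graphql"), ("stash_id", "abc")], [("endpoint", "other")]]

def Spec_get_stash_ids_py (stash_ids : Option (List (List (String × String)))) (out : List (String × Option String)) : Prop := out = get_stash_ids_py_alt stash_ids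
instance (stash_ids : Option (List (List (String × String)))) (out : List (String × Option String)) : Decidable (Spec_get_stash_ids_py stash_ids out) := by unfold Spec_get_stash_ids_py; infer_instance

-- ===== CLAIM (what is proved, stated in full; the proofs are below) =====
def Claim_equal_get_stash_ids_py : Prop := ∀ (stash_ids : Option (List (List (String × String)))), Dom_get_stash_ids_py stash_ids → Pre_get_stash_ids_py stash_ids → Spec_get_stash_ids_py stash_ids (get_stash_ids_py stash_ids)

-- ===== LEMMAS AND PROOFS =====

-- A's result dict at any point, written by its three slots
def pvMkRes (a b c : Option String) : PySem.Dict String (Option String) :=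
  PySem.Dict.mk [("stash_studios_stashdb_id", a), ("stash_studios_tpdb_id", b), ("stash_studios_ce_id", c)]

def pvM (ep : String) (s : List (String × String)) : Bool :=
  (PySem.Dict.mk s).getD "endpoint" "" == ep

def pvV (s : List (String × String)) : Option String := (PySem.Dict.mk s).get? "stash_id"

theorem pvStepA_char (a b c : Option String) (s : List (String × String)) :
    pvStepA (pvMkRes a b c) s =
      pvMkRes (if pvM "https://stashdb.org/graphql" s then pvV s else a)
              (if pvM "https://theporndb.net/graphql" s then pvV s else b)
              (if pvM "https://culture.extractor/graphql" s then pvV s else c) := by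
  unfold pvStepA pvMkRes pvM pvV
  by_cases e1 : (PySem.Dict.mk s).getD "endpoint" "" = "https://stashdb.org/graphql"
  · apply PySem.Dict.ext
    simp [e1, PySem.Dict.items_insert]
  · by_cases e2 : (PySem.Dict.mk s).getD "endpoint" "" = "https://theporndb.net/graphql"
    · apply PySem.Dict.ext
      simp [e2, PySem.Dict.items_insert]
    · by_cases e3 : (PySem.Dict.mk s).getD "endpoint" "" = "https://culture.extractor/graphql"
      · apply PySem.Dict.ext
        simp [e3, PySem.Dict.items_insert]
      · simp [e1, e2, e3]

-- how B's per-endpoint search reads one more trailing element of the original list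
theorem pvFirst_snoc (l : List (List (String × String))) (s : List (String × String)) (ep : String) :
    pvFirst (l ++ [s]).reverse ep = if pvM ep s then pvV s else pvFirst l.reverse ep := by
  unfold pvFirst pvM pvV
  simp only [List.reverse_append, List.reverse_singleton, List.singleton_append, List.find?_cons]
  cases hb : (PySem.Dict.mk s).getD "endpoint" "" == ep <;> simp_all

-- A's fold from the initial all-None state = B's three searches over the reversed list
theorem pvFold_char (l : List (List (String × String))) :
    l.foldl pvStepA (pvMkRes none none none) =
      pvMkRes (pvFirst l.reverse "https://stashdb.org/graphql")
              (pvFirst l.reverse "https://theporndb.net/graphql")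
              (pvFirst l.reverse "https://culture.extractor/graphql") := by
  induction l using List.reverseRecOn with
  | nil => rfl
  | append_singleton t s ih =>
    rw [List.foldl_append, ih, List.foldl_cons, List.foldl_nil, pvStepA_char,
      pvFirst_snoc, pvFirst_snoc, pvFirst_snoc]

theorem pvItems_mkRes (a b c : Option String) :
    (pvMkRes a b c).items =
      [("stash_studios_stashdb_id", a), ("stash_studios_tpdb_id", b), ("stash_studios_ce_id", c)] := by
  rfl

-- ===== VERDICT (by name: the statement is the Claim_ definition above) =====
theorem get_stash_ids_py_spec : Claim_equal_get_stash_ids_py := by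
  intro stash_ids _ _
  unfold Spec_get_stash_ids_py get_stash_ids_py get_stash_ids_py_alt
  match stash_ids with
  | none => rfl
  | some l =>
    by_cases h : l.isEmpty
    · simp only [h, if_true]
      rfl
    · simp only [h]
      show (l.foldl pvStepA (pvMkRes none none none)).items = _
      rw [pvFold_char, pvItems_mkRes]
      rfl
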